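-- pv_equiv track=rewrite | github.com/cycyBell/ai-ds-decision-making | Classical_ds_ahp.py | focal_elements
-- ===== SOURCE A (Python) =====
-- def focal_elements(favorability: list, alternatives: list):
--     fTemp = favorability[:]
--     n = len(fTemp)
--     focal_element = []
--     f_dict = dict()
--
--     for i in range(n):
--
--         if fTemp[i]  != 0:
--             focal_element.append(alternatives[i])
--         for j in range(i+1, n):
--             if fTemp[i] == fTemp[j] and fTemp[i] != 0:
--                 focal_element.append(alternatives[j])
--                 fTemp[j] = 0
--         if fTemp[i]  != 0:
--             f_dict[(fTemp[i])] = focal_element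
--         focal_element = []
--
--     return f_dict
-- ===== SOURCE B (Python) =====
-- def focal_elements(favorability: list, alternatives: list):
--     groups = {}
--     for i, f in enumerate(favorability):
--         if f != 0:
--             groups.setdefault(f, []).append(alternatives[i])
--     return groups
-- ===== Notes on version B (the rewrite author's own statement) =====
-- stated objective: faster
-- what changed: Replaces A's quadratic nested scan (for each index, rescan the whole suffix for equal favorability values and zero them out) by a single left-to-right pass that groups alternatives into a dict keyed by favorability value via setdefault.
import Mathlib
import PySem

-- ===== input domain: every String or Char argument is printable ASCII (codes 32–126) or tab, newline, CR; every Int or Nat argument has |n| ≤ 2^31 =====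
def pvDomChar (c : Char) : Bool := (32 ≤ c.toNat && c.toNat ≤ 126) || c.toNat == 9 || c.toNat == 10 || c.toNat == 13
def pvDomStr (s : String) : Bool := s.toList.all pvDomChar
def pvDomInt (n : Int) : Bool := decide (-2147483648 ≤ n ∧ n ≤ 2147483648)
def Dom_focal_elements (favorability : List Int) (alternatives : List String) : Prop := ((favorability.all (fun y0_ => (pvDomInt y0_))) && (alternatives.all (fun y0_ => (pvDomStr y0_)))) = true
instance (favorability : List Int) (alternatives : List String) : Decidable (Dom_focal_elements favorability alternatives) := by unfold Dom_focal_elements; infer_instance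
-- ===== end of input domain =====

-- B replaces A's quadratic nested suffix-scan by one linear pass grouping alternatives
-- into a dict keyed by (nonzero) favorability value; equal return value proved on Pre_.


-- ===== PORT A =====
-- All list indices A uses are nonnegative and (inside Pre_) in range, where Python's
-- xs[i] is exactly List.getD; outside Pre_ (IndexError) nothing is claimed.
-- inner loop 'for j in range(i+1, n): …' over the index list js, state (focal_element, fTemp)
def feInner (alts : List String) (fi : Int) : List Nat → List String → List Int → List String × List Int
  | [], acc, fTemp => (acc, fTemp)
  | j :: js, acc, fTemp =>
    if fi = fTemp.getD j 0 ∧ fi ≠ 0 then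
      feInner alts fi js (acc ++ [alts.getD j ""]) (fTemp.set j 0)
    else
      feInner alts fi js acc fTemp

-- outer loop 'for i in range(n): …' over the index list, state (fTemp, f_dict)
def feOuter (alts : List String) (n : Nat) : List Nat → List Int → PySem.Dict Int (List String) → PySem.Dict Int (List String)
  | [], _, d => d
  | i :: is, fTemp, d =>
    let fi := fTemp.getD i 0
    let fe1 := if fi ≠ 0 then [alts.getD i ""] else []
    let r := feInner alts fi (List.range' (i+1) (n - (i+1))) fe1 fTemp
    let d' := if fi ≠ 0 then d.insert fi r.1 else d
    feOuter alts n is r.2 d'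

def focal_elements (favorability : List Int) (alternatives : List String) : List (Int × List String) :=
  (feOuter alternatives favorability.length (List.range favorability.length) favorability PySem.Dict.empty).items

-- ===== PORT B =====
-- one pass over enumerate(favorability); groups.setdefault(f, []).append(alternatives[i])
-- is Dict.modify f [] (· ++ [alternatives[i]])
def focal_elements_alt (favorability : List Int) (alternatives : List String) : List (Int × List String) :=
  ((PySem.List.enumerate favorability 0).foldl
    (fun d p => if p.2 ≠ 0 then d.modify p.2 [] (· ++ [PySem.List.pyGetD alternatives p.1 ""]) else d)
    PySem.Dict.empty).items

-- ===== PRECONDITION & SPEC =====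
-- Pre_ excludes exactly the inputs where Python A raises IndexError: some index carrying a
-- nonzero favorability value has no alternative (i ≥ len(alternatives)).
def Pre_focal_elements (favorability : List Int) (alternatives : List String) : Prop :=
  ∀ i ∈ List.range favorability.length, favorability.getD i 0 ≠ 0 → i < alternatives.length
instance (favorability : List Int) (alternatives : List String) : Decidable (Pre_focal_elements favorability alternatives) := by unfold Pre_focal_elements; infer_instance

def pvWitness_focal_elements : List Int × List String := ([1, 2, 1, 0], ["a", "b", "c", "d"])

def Spec_focal_elements (favorability : List Int) (alternatives : List String) (out : List (Int × List String)) : Prop := out = focal_elements_alt favorability alternatives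
instance (favorability : List Int) (alternatives : List String) (out : List (Int × List String)) : Decidable (Spec_focal_elements favorability alternatives out) := by unfold Spec_focal_elements; infer_instance

-- ===== CLAIM (what is proved, stated in full; the proofs are below) =====
def Claim_equal_focal_elements : Prop := ∀ (favorability : List Int) (alternatives : List String), Dom_focal_elements favorability alternatives → Pre_focal_elements favorability alternatives → Spec_focal_elements favorability alternatives (focal_elements favorability alternatives)

-- ===== LEMMAS AND PROOFS =====

-- the (favorability value, alternative) pair at each index, from index k on
def pvPairsFrom (alts : List String) : List Int → Nat → List (Int × String)
  | [], _ => []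
  | f :: fs, k => (f, alts.getD k "") :: pvPairsFrom alts fs (k + 1)

def pvGrp (v : Int) (ps : List (Int × String)) : List String :=
  (ps.filter (fun p => p.1 == v)).map Prod.snd

def pvZero (v : Int) (ps : List (Int × String)) : List (Int × String) :=
  ps.map (fun p => if p.1 == v then (0, p.2) else p)

def pvKeys (ps : List (Int × String)) : List Int :=
  PySem.Set.ofList ((ps.filter (fun p => !(p.1 == 0))).map (·.1))

-- A's grouping strategy, abstracted to the pair list: take the head's whole group, zero
-- out its duplicates, continue.
def pvCanon : List (Int × String) → List (Int × List String)
  | [] => []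
  | (v, a) :: rest =>
    if v = 0 then pvCanon rest
    else (v, a :: pvGrp v rest) :: pvCanon (pvZero v rest)
termination_by ps => ps.length
decreasing_by all_goals simp [pvZero]

theorem pvGrp_cons (w : Int) (p : Int × String) (rest : List (Int × String)) :
    pvGrp w (p :: rest) = if p.1 == w then p.2 :: pvGrp w rest else pvGrp w rest := by
  simp only [pvGrp, List.filter_cons]
  by_cases h : p.1 == w <;> simp [h]

theorem pvZero_cons (v : Int) (p : Int × String) (rest : List (Int × String)) :
    pvZero v (p :: rest) = (if p.1 == v then ((0 : Int), p.2) else p) :: pvZero v rest := rfl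

theorem pvKeys_ne_zero (ps : List (Int × String)) : ∀ w ∈ pvKeys ps, w ≠ 0 := by
  intro w hw
  have hw' : w ∈ (ps.filter (fun p => !(p.1 == 0))).map (·.1) :=
    (PySem.Set.mem_ofList _ _).mp hw
  rcases List.mem_map.mp hw' with ⟨p, hp, hpe⟩
  have := (List.mem_filter.mp hp).2
  simp only [Bool.not_eq_eq_eq_not, Bool.not_true, beq_eq_false_iff_ne] at this
  exact hpe ▸ this

theorem pvGrp_zero (v w : Int) (hw0 : w ≠ 0) (hwv : w ≠ v) (ps : List (Int × String)) :
    pvGrp w (pvZero v ps) = pvGrp w ps := by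
  induction ps with
  | nil => rfl
  | cons p rest ih =>
    rw [pvZero_cons]
    by_cases hp : p.1 = v
    · rw [if_pos (show (p.1 == v) = true from by simpa using hp)]
      rw [pvGrp_cons, pvGrp_cons]
      have hne1 : p.1 ≠ w := by rw [hp]; exact Ne.symm hwv
      rw [if_neg (show ¬ (((0 : Int), p.2).1 == w) = true from by simpa using Ne.symm hw0)]
      rw [if_neg (show ¬ (p.1 == w) = true from by simpa using hne1)]
      exact ih
    · rw [if_neg (show ¬ (p.1 == v) = true from by simpa using hp)]
      rw [pvGrp_cons, pvGrp_cons]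
      by_cases hpw : (p.1 == w) = true
      · rw [if_pos hpw, if_pos hpw, ih]
      · rw [if_neg hpw, if_neg hpw, ih]

theorem pvOfList_filter (q : Int → Bool) (l : List Int) :
    PySem.Set.ofList (l.filter q) = List.filter q (PySem.Set.ofList l) := by
  induction l with
  | nil => rfl
  | cons x xs ih =>
    rw [List.filter_cons]
    by_cases hx : q x
    · rw [if_pos hx, PySem.Set.ofList_cons, PySem.Set.ofList_cons]
      simp only [PySem.Set.discard]
      rw [List.filter_cons, if_pos hx, ih, List.filter_comm]
    · rw [if_neg hx, ih, PySem.Set.ofList_cons]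
      simp only [PySem.Set.discard]
      rw [List.filter_cons, if_neg hx, List.filter_filter]
      refine (List.filter_congr ?_).symm
      intro a _
      by_cases h : a == x
      · have : a = x := eq_of_beq h
        simp [this, hx]
      · simp [h]

theorem pvKeys_zero (v : Int) (hv : v ≠ 0) (ps : List (Int × String)) :
    pvKeys (pvZero v ps) = (pvKeys ps).filter (fun w => !(w == v)) := by
  unfold pvKeys
  rw [← pvOfList_filter]
  congr 1
  induction ps with
  | nil => rfl
  | cons p rest ih =>
    rw [pvZero_cons, List.filter_cons, List.filter_cons]
    by_cases hp : p.1 = v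
    · rw [if_pos (show (p.1 == v) = true from by simpa using hp)]
      rw [if_neg (show ¬ (!(((0 : Int), p.2).1 == (0 : Int))) = true from by simp)]
      have hp0 : p.1 ≠ 0 := by rw [hp]; exact hv
      rw [if_pos (show (!(p.1 == (0 : Int))) = true from by simpa using hp0)]
      rw [List.map_cons, List.filter_cons]
      rw [if_neg (show ¬ (!(p.1 == v)) = true from by simpa using hp)]
      exact ih
    · rw [if_neg (show ¬ (p.1 == v) = true from by simpa using hp)]
      by_cases h0 : p.1 = 0
      · rw [if_neg (show ¬ (!(p.1 == (0 : Int))) = true from by simpa using h0),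
          if_neg (show ¬ (!(p.1 == (0 : Int))) = true from by simpa using h0)]
        exact ih
      · rw [if_pos (show (!(p.1 == (0 : Int))) = true from by simpa using h0),
          if_pos (show (!(p.1 == (0 : Int))) = true from by simpa using h0)]
        rw [List.map_cons, List.map_cons, List.filter_cons]
        rw [if_pos (show (!(p.1 == v)) = true from by simpa using hp)]
        rw [ih]

theorem pvCanon_eq_keys_map (ps : List (Int × String)) :
    pvCanon ps = (pvKeys ps).map (fun v => (v, pvGrp v ps)) := by
  induction ps using pvCanon.induct with
  | case1 => simp [pvCanon, pvKeys]
  | case2 a rest ih =>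
    rw [pvCanon, if_pos rfl, ih]
    have hk : pvKeys (((0 : Int), a) :: rest) = pvKeys rest := by
      unfold pvKeys
      rw [List.filter_cons, if_neg (show ¬ (!(((0 : Int), a).1 == (0 : Int))) = true from by simp)]
    rw [hk]
    refine List.map_congr_left ?_
    intro w hw
    rw [pvGrp_cons, if_neg (by simpa using Ne.symm (pvKeys_ne_zero rest w hw))]
  | case3 v a rest hv ih =>
    rw [pvCanon, if_neg hv, ih]
    have hk : pvKeys ((v, a) :: rest) = v :: (pvKeys rest).filter (fun w => !(w == v)) := by
      unfold pvKeys
      rw [List.filter_cons, if_pos (show (!((v, a).1 == (0 : Int))) = true from by simpa using hv)]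
      rw [List.map_cons, PySem.Set.ofList_cons]
      simp only [PySem.Set.discard]
    rw [hk, List.map_cons, pvGrp_cons, if_pos (by simp), pvKeys_zero v hv]
    congr 1
    refine List.map_congr_left ?_
    intro w hw
    have hwv : w ≠ v := by
      have := (List.mem_filter.mp hw).2
      simpa using this
    have hw0 : w ≠ 0 := pvKeys_ne_zero rest w (List.mem_filter.mp hw).1
    rw [pvGrp_zero v w hw0 hwv, pvGrp_cons, if_neg (by simpa using Ne.symm hwv)]

theorem feInner_zero (alts : List String) (js : List Nat) (acc : List String) (fTemp : List Int) :
    feInner alts 0 js acc fTemp = (acc, fTemp) := by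
  induction js generalizing acc fTemp with
  | nil => rfl
  | cons j js ih => simp [feInner, ih]

theorem feInner_fst (alts : List String) (fi : Int) (hfi : fi ≠ 0) :
    ∀ (js : List Nat) (acc : List String) (fTemp : List Int), js.Pairwise (· < ·) →
    (feInner alts fi js acc fTemp).1
      = acc ++ (js.filter (fun j => fi = fTemp.getD j 0)).map (fun j => alts.getD j "") := by
  intro js
  induction js with
  | nil => intro acc fTemp _; simp [feInner]
  | cons j js ih =>
    intro acc fTemp hpw
    have hlt : ∀ j' ∈ js, j < j' := (List.pairwise_cons.mp hpw).1
    have hpw' : js.Pairwise (· < ·) := (List.pairwise_cons.mp hpw).2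
    simp only [feInner]
    split_ifs with h
    · rw [ih _ _ hpw']
      have hf : js.filter (fun j' => decide (fi = (fTemp.set j 0).getD j' 0))
          = js.filter (fun j' => decide (fi = fTemp.getD j' 0)) := by
        refine List.filter_congr ?_
        intro j' hj'
        rw [List.getD_eq_getElem?_getD, List.getElem?_set_ne (Nat.ne_of_lt (hlt j' hj')),
          ← List.getD_eq_getElem?_getD]
      rw [hf]
      simp [h.1]
    · have hne : ¬ (fi = fTemp.getD j 0) := fun hc => h ⟨hc, hfi⟩
      rw [ih _ _ hpw']
      rw [List.filter_cons, if_neg (by simpa using hne)]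

theorem feInner_snd_getD (alts : List String) (fi : Int) :
    ∀ (js : List Nat) (acc : List String) (fTemp : List Int) (k : Nat), js.Pairwise (· < ·) →
    (feInner alts fi js acc fTemp).2.getD k 0
      = if k ∈ js ∧ fTemp.getD k 0 = fi ∧ fi ≠ 0 then 0 else fTemp.getD k 0 := by
  intro js
  induction js with
  | nil => intro acc fTemp k _; simp [feInner]
  | cons j js ih =>
    intro acc fTemp k hpw
    have hlt : ∀ j' ∈ js, j < j' := (List.pairwise_cons.mp hpw).1
    have hpw' : js.Pairwise (· < ·) := (List.pairwise_cons.mp hpw).2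
    have hmem : ∀ hk : ¬ k = j, k ∈ j :: js → k ∈ js := by
      intro hk hm
      rcases List.mem_cons.mp hm with h1 | h1
      · exact absurd h1 hk
      · exact h1
    simp only [feInner]
    split_ifs with h h2 h2
    · -- code matched at j, spec condition holds for k
      rw [ih _ _ _ hpw']
      by_cases hk : k = j
      · subst hk
        have hkjs : k ∉ js := fun hm => absurd (hlt k hm) (lt_irrefl k)
        have hklen : k < fTemp.length := by
          by_contra hge
          have : fTemp.getD k 0 = 0 := List.getD_eq_default _ _ (Nat.le_of_not_lt hge)
          exact h.2 (h.1.trans this)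
        rw [if_neg (fun hc => hkjs hc.1), List.getD_eq_getElem?_getD,
          List.getElem?_set_self hklen]
        rfl
      · have hset : (fTemp.set j 0).getD k 0 = fTemp.getD k 0 := by
          rw [List.getD_eq_getElem?_getD, List.getElem?_set_ne (Ne.symm hk),
            ← List.getD_eq_getElem?_getD]
        rw [if_pos ⟨hmem hk h2.1, hset.trans h2.2.1, h2.2.2⟩]
    · -- code matched at j, spec condition fails for k
      rw [ih _ _ _ hpw']
      by_cases hk : k = j
      · exact absurd ⟨by rw [hk]; exact List.mem_cons_self, hk ▸ h.1.symm, h.2⟩ h2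
      · have hset : (fTemp.set j 0).getD k 0 = fTemp.getD k 0 := by
          rw [List.getD_eq_getElem?_getD, List.getElem?_set_ne (Ne.symm hk),
            ← List.getD_eq_getElem?_getD]
        rw [if_neg (fun hc => h2 ⟨List.mem_cons_of_mem _ hc.1, hset.symm.trans hc.2.1, hc.2.2⟩)]
        exact hset
    · -- code did not match at j, spec condition holds for k
      rw [ih _ _ _ hpw']
      by_cases hk : k = j
      · exact absurd ⟨(hk ▸ h2.2.1 : fTemp.getD j 0 = fi).symm, h2.2.2⟩ h
      · rw [if_pos ⟨hmem hk h2.1, h2.2⟩]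
    · -- neither
      rw [ih _ _ _ hpw']
      rw [if_neg (fun hc => h2 ⟨List.mem_cons_of_mem _ hc.1, hc.2⟩)]

theorem feInner_snd_len (alts : List String) (fi : Int) :
    ∀ (js : List Nat) (acc : List String) (fTemp : List Int),
    (feInner alts fi js acc fTemp).2.length = fTemp.length := by
  intro js
  induction js with
  | nil => intro _ _; rfl
  | cons j js ih =>
    intro acc fTemp
    simp only [feInner]
    split_ifs with h
    · rw [ih]; simp
    · exact ih _ _

theorem feOuter_items (alts : List String) (n : Nat) :
    ∀ (m i : Nat) (fTemp : List Int) (d : PySem.Dict Int (List String)),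
    fTemp.length = n → i + m = n →
    (∀ j, i ≤ j → fTemp.getD j 0 ≠ 0 → d.get? (fTemp.getD j 0) = none) →
    (feOuter alts n (List.range' i m) fTemp d).items
      = d.items ++ pvCanon ((List.range' i m).map (fun j => (fTemp.getD j 0, alts.getD j ""))) := by
  intro m
  induction m with
  | zero => intro i fTemp d _ _ _; simp [feOuter, pvCanon]
  | succ m ih =>
    intro i fTemp d hlen hin hd
    have hjs : n - (i + 1) = m := by omega
    rw [List.range'_succ]
    simp only [feOuter, hjs]
    have hpw : (List.range' (i+1) m).Pairwise (· < ·) := List.pairwise_lt_range'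
    by_cases hfi : fTemp.getD i 0 ≠ 0
    · rw [if_pos hfi, if_pos hfi]
      -- the strings collected by the inner loop are exactly the group of fi in the tail pairs
      have hfst : (feInner alts (fTemp.getD i 0) (List.range' (i+1) m) [alts.getD i ""] fTemp).1
          = alts.getD i ""
            :: pvGrp (fTemp.getD i 0) ((List.range' (i+1) m).map (fun j => (fTemp.getD j 0, alts.getD j ""))) := by
        rw [feInner_fst alts _ hfi _ _ _ hpw]
        unfold pvGrp
        rw [List.filter_map, List.map_map]
        have hpredeq : ((fun (p : Int × String) => p.1 == fTemp.getD i 0)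
              ∘ (fun j => (fTemp.getD j 0, alts.getD j "")))
            = (fun j : Nat => decide (fTemp.getD i 0 = fTemp.getD j 0)) := by
          funext j
          show (fTemp.getD j 0 == fTemp.getD i 0) = decide (fTemp.getD i 0 = fTemp.getD j 0)
          rw [Bool.beq_eq_decide_eq]
          exact decide_eq_decide.mpr eq_comm
        rw [hpredeq]
        rfl
      set fTemp' := (feInner alts (fTemp.getD i 0) (List.range' (i+1) m) [alts.getD i ""] fTemp).2 with hT'
      have hget : ∀ k, fTemp'.getD k 0
          = if k ∈ List.range' (i+1) m ∧ fTemp.getD k 0 = fTemp.getD i 0 then 0 else fTemp.getD k 0 := by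
        intro k
        rw [hT', feInner_snd_getD alts _ _ _ _ _ hpw]
        by_cases hc : k ∈ List.range' (i+1) m ∧ fTemp.getD k 0 = fTemp.getD i 0
        · rw [if_pos ⟨hc.1, hc.2, hfi⟩, if_pos hc]
        · rw [if_neg (fun h2 => hc ⟨h2.1, h2.2.1⟩), if_neg hc]
      -- the zeroed-out suffix corresponds to pvZero on the tail pairs
      have hzero : (List.range' (i+1) m).map (fun j => (fTemp'.getD j 0, alts.getD j ""))
          = pvZero (fTemp.getD i 0)
              ((List.range' (i+1) m).map (fun j => (fTemp.getD j 0, alts.getD j ""))) := by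
        unfold pvZero
        rw [List.map_map]
        refine List.map_congr_left ?_
        intro j hj
        simp only [Function.comp]
        rw [hget j]
        by_cases hv : fTemp.getD j 0 = fTemp.getD i 0
        · rw [if_pos ⟨hj, hv⟩, if_pos (by simpa using hv)]
        · rw [if_neg (fun h2 => hv h2.2), if_neg (by simpa using hv)]
      have hcontains : d.contains (fTemp.getD i 0) = false := by
        rw [← PySem.Dict.get?_eq_none_iff_contains]
        exact hd i (le_refl i) hfi
      have hd' : ∀ j, i + 1 ≤ j → fTemp'.getD j 0 ≠ 0 →
          (d.insert (fTemp.getD i 0)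
            (feInner alts (fTemp.getD i 0) (List.range' (i+1) m) [alts.getD i ""] fTemp).1).get?
            (fTemp'.getD j 0) = none := by
        intro j hj hne
        rw [hget j] at hne ⊢
        by_cases hc : j ∈ List.range' (i+1) m ∧ fTemp.getD j 0 = fTemp.getD i 0
        · rw [if_pos hc] at hne; exact absurd rfl hne
        · rw [if_neg hc] at hne ⊢
          have hjm : j ∈ List.range' (i+1) m := by
            rw [List.mem_range'_1]
            constructor
            · exact hj
            · by_contra hge
              exact hne (List.getD_eq_default _ _ (by omega))
          have hvne : fTemp.getD j 0 ≠ fTemp.getD i 0 := fun h2 => hc ⟨hjm, h2⟩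
          rw [PySem.Dict.get?_insert_of_ne _ _ hvne]
          exact hd j (by omega) hne
      rw [ih (i+1) fTemp' _ (by rw [hT', feInner_snd_len]; exact hlen) (by omega) hd']
      rw [PySem.Dict.items_insert_of_not_contains _ _ hcontains]
      rw [hzero, hfst]
      have hcanon : pvCanon ((fTemp.getD i 0, alts.getD i "")
            :: (List.range' (i+1) m).map (fun j => (fTemp.getD j 0, alts.getD j "")))
          = (fTemp.getD i 0, alts.getD i ""
              :: pvGrp (fTemp.getD i 0) ((List.range' (i+1) m).map (fun j => (fTemp.getD j 0, alts.getD j ""))))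
            :: pvCanon (pvZero (fTemp.getD i 0)
              ((List.range' (i+1) m).map (fun j => (fTemp.getD j 0, alts.getD j "")))) := by
        rw [pvCanon]
        rw [if_neg hfi]
      rw [List.map_cons, hcanon]
      simp
    · -- fTemp[i] = 0: nothing happens at this index
      rw [if_neg hfi, if_neg hfi]
      have hfi : fTemp.getD i 0 = 0 := not_not.mp hfi
      rw [hfi, feInner_zero]
      rw [ih (i+1) fTemp d hlen (by omega) (fun j hj => hd j (by omega))]
      have : pvCanon (((0 : Int), alts.getD i "")
            :: (List.range' (i+1) m).map (fun j => (fTemp.getD j 0, alts.getD j "")))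
          = pvCanon ((List.range' (i+1) m).map (fun j => (fTemp.getD j 0, alts.getD j ""))) := by
        rw [pvCanon]
        rw [if_pos rfl]
      rw [List.map_cons, hfi]
      rw [this]

theorem pvPairsFrom_range' (alts : List String) :
    ∀ (m i : Nat) (fTemp : List Int), i + m = fTemp.length →
    (List.range' i m).map (fun j => (fTemp.getD j 0, alts.getD j ""))
      = pvPairsFrom alts (fTemp.drop i) i := by
  intro m
  induction m with
  | zero =>
    intro i fTemp h
    rw [List.drop_eq_nil_of_le (by omega)]
    rfl
  | succ m ih =>
    intro i fTemp h
    have hi : i < fTemp.length := by omega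
    rw [List.range'_succ, List.drop_eq_getElem_cons hi]
    simp only [List.map_cons, pvPairsFrom]
    rw [List.getD_eq_getElem fTemp 0 hi, ih (i+1) fTemp (by omega)]

theorem focal_elements_eq_canon (fav : List Int) (alts : List String) :
    focal_elements fav alts = pvCanon (pvPairsFrom alts fav 0) := by
  unfold focal_elements
  rw [List.range_eq_range']
  rw [feOuter_items alts fav.length fav.length 0 fav PySem.Dict.empty rfl (by omega)
    (fun j _ _ => PySem.Dict.get?_empty _)]
  rw [pvPairsFrom_range' alts fav.length 0 fav (by omega)]
  simp [show (PySem.Dict.empty (κ := Int) (ν := List String)).items = [] from rfl]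

theorem pvDictItemsEq (d : PySem.Dict Int (List String)) (h : d.keys.Nodup) :
    d.items = d.keys.map (fun k => (k, d.getD k [])) := by
  conv_lhs => rw [← List.map_id d.items]
  rw [show d.keys = d.items.map (·.1) from rfl, List.map_map]
  refine List.map_congr_left ?_
  intro p hp
  show p = (p.1, d.getD p.1 [])
  rw [PySem.Dict.getD_of_mem_items d (k := p.1) (v := p.2) hp h []]

theorem pvEnum_pairs (alts : List String) :
    ∀ (fs : List Int) (k : Nat),
    (PySem.List.enumerate fs (k : Int)).map (fun p => (p.2, PySem.List.pyGetD alts p.1 ""))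
      = pvPairsFrom alts fs k := by
  intro fs
  induction fs with
  | nil => intro k; rfl
  | cons f fs ih =>
    intro k
    rw [PySem.List.enumerate_cons, List.map_cons]
    show (f, PySem.List.pyGetD alts (k : Int) "") :: _ = (f, alts.getD k "") :: pvPairsFrom alts fs (k+1)
    congr 1
    · rw [PySem.List.pyGetD_natCast]
    · rw [show ((k : Int) + 1) = ((k + 1 : Nat) : Int) by push_cast; ring]
      exact ih (k + 1)

theorem focal_elements_alt_eq_keys_map (fav : List Int) (alts : List String) :
    focal_elements_alt fav alts
      = (pvKeys (pvPairsFrom alts fav 0)).map (fun v => (v, pvGrp v (pvPairsFrom alts fav 0))) := by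
  unfold focal_elements_alt
  have hfun : (fun (d : PySem.Dict Int (List String)) (p : Int × Int) =>
        if p.2 ≠ 0 then d.modify p.2 [] (· ++ [PySem.List.pyGetD alts p.1 ""]) else d)
      = (fun d p => if (!(p.2 == 0)) = true then d.modify p.2 [] (· ++ [PySem.List.pyGetD alts p.1 ""]) else d) := by
    funext d p
    by_cases h : p.2 = 0 <;> simp [h]
  rw [hfun, ← List.foldl_filter]
  have hmap : (((PySem.List.enumerate fav 0).filter (fun p => !(p.2 == 0))).map
          (fun p => (p.2, PySem.List.pyGetD alts p.1 ""))).foldl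
        (fun d q => d.modify q.1 [] (· ++ [q.2])) PySem.Dict.empty
      = ((PySem.List.enumerate fav 0).filter (fun p => !(p.2 == 0))).foldl
        (fun d p => d.modify p.2 [] (· ++ [PySem.List.pyGetD alts p.1 ""])) PySem.Dict.empty :=
    List.foldl_map
  rw [← hmap]
  have hps : (PySem.List.enumerate fav 0).map (fun p => (p.2, PySem.List.pyGetD alts p.1 ""))
      = pvPairsFrom alts fav 0 := by
    have := pvEnum_pairs alts fav 0
    simpa using this
  have hlist : ((PySem.List.enumerate fav 0).filter (fun p => !(p.2 == 0))).map
      (fun p => (p.2, PySem.List.pyGetD alts p.1 ""))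
      = (pvPairsFrom alts fav 0).filter (fun p => !(p.1 == 0)) := by
    rw [← hps]
    exact (List.filter_map (f := fun p : Int × Int => (p.2, PySem.List.pyGetD alts p.1 ""))
      (p := fun q : Int × String => !(q.1 == 0)) (l := PySem.List.enumerate fav 0)).symm
  rw [hlist]
  set D : PySem.Dict Int (List String) :=
    ((pvPairsFrom alts fav 0).filter (fun p => !(p.1 == 0))).foldl
      (fun d q => d.modify q.1 [] (· ++ [q.2])) PySem.Dict.empty with hD
  have hkeys : D.keys = pvKeys (pvPairsFrom alts fav 0) := by
    rw [hD]
    have h1 := PySem.Dict.keys_foldl_modify_key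
      ((pvPairsFrom alts fav 0).filter (fun p => !(p.1 == 0))) Prod.fst ([] : List String)
      (fun _ q => (· ++ [q.2])) PySem.Dict.empty
    rw [h1, PySem.Dict.keys_empty, PySem.Set.update_nil_left]
    rfl
  have hnodup : D.keys.Nodup := by
    rw [hD]
    exact PySem.Dict.nodup_keys_foldl_modify_key _ Prod.fst ([] : List String)
      (fun _ q => (· ++ [q.2])) PySem.Dict.empty PySem.Dict.nodup_keys_empty
  rw [pvDictItemsEq _ hnodup, hkeys]
  refine List.map_congr_left ?_
  intro k hk
  have hk0 : k ≠ 0 := pvKeys_ne_zero _ k hk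
  have hgetD : D.getD k []
      = pvGrp k ((pvPairsFrom alts fav 0).filter (fun p => !(p.1 == 0))) := by
    rw [hD]
    have h2 := PySem.Dict.getD_foldl_modify_append
      ((pvPairsFrom alts fav 0).filter (fun p => !(p.1 == 0))) PySem.Dict.empty k
    rw [h2, PySem.Dict.getD_empty]
    rfl
  rw [hgetD]
  have hgrp : pvGrp k ((pvPairsFrom alts fav 0).filter (fun p => !(p.1 == 0)))
      = pvGrp k (pvPairsFrom alts fav 0) := by
    unfold pvGrp
    rw [List.filter_filter]
    congr 1
    refine List.filter_congr ?_
    intro p _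
    by_cases hp : p.1 = k
    · have h1 : (p.1 == k) = true := by simpa using hp
      have h2 : (!(p.1 == (0 : Int))) = true := by simpa using hp ▸ hk0
      rw [h1, h2]
      rfl
    · have h1 : (p.1 == k) = false := by simpa using hp
      rw [h1]
      simp
  rw [hgrp]

theorem focal_elements_spec : Claim_equal_focal_elements := by
  intro fav alts _ _
  unfold Spec_focal_elements
  rw [focal_elements_eq_canon, focal_elements_alt_eq_keys_map, pvCanon_eq_keys_map]
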